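-- pv_equiv track=rewrite | github.com/ahmmedfouad/Project-Continuity-Monitor | ai/engine.py | _recommendations_from_causes
-- ===== SOURCE A (Python) =====
-- from typing import Any, Dict, List
--
-- def _recommendations_from_causes(causes: List[str]) -> List[str]:
--     recs: List[str] = []
--
--     if any("silence" in c.lower() or "cadence" in c.lower() for c in causes):
--         recs.append("Schedule a status checkpoint within 48 hours")
--         recs.append("Request a written progress update with blockers")
--
--     if any("completion" in c.lower() or "milestone" in c.lower() for c in causes):
--         recs.append("Re-baseline milestones and confirm next 2 deliverables")
--         recs.append("Add weekly milestone acceptance review")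
--
--     if any("payment" in c.lower() for c in causes):
--         recs.append("Escalate payment clearance and confirm disbursement date")
--
--     if any("dependency" in c.lower() for c in causes):
--         recs.append("Create dependency owner list and set due dates")
--
--     if any("procurement" in c.lower() for c in causes):
--         recs.append("Review procurement timeline and vendor readiness")
--
--     if any("uat" in c.lower() for c in causes):
--         recs.append("Define UAT entry/exit criteria and assign test owners")
--
--     return recs[:6] if recs else ["Monitor and keep update cadence stable"]
-- ===== SOURCE B (Python) =====
-- from typing import List
--
-- def _recommendations_from_causes(causes: List[str]) -> List[str]:
--     # single pass: lower each cause once, record which keyword groups were hit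
--     hit_sil = hit_mil = hit_pay = hit_dep = hit_proc = hit_uat = False
--     for c in causes:
--         lc = c.lower()
--         hit_sil = hit_sil or "silence" in lc or "cadence" in lc
--         hit_mil = hit_mil or "completion" in lc or "milestone" in lc
--         hit_pay = hit_pay or "payment" in lc
--         hit_dep = hit_dep or "dependency" in lc
--         hit_proc = hit_proc or "procurement" in lc
--         hit_uat = hit_uat or "uat" in lc
--     recs: List[str] = []
--     if hit_sil:
--         recs += ["Schedule a status checkpoint within 48 hours",
--                  "Request a written progress update with blockers"]
--     if hit_mil:
--         recs += ["Re-baseline milestones and confirm next 2 deliverables",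
--                  "Add weekly milestone acceptance review"]
--     if hit_pay:
--         recs += ["Escalate payment clearance and confirm disbursement date"]
--     if hit_dep:
--         recs += ["Create dependency owner list and set due dates"]
--     if hit_proc:
--         recs += ["Review procurement timeline and vendor readiness"]
--     if hit_uat:
--         recs += ["Define UAT entry/exit criteria and assign test owners"]
--     return recs[:6] if recs else ["Monitor and keep update cadence stable"]
-- ===== Notes on version B (the rewrite author's own statement) =====
-- stated objective: faster
-- what changed: B makes a single pass over causes, lowering each cause once and accumulating six hit flags, then emits the fixed recommendation strings from the flags, instead of A's six separate any(...) scans that each re-lower every cause.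
import Mathlib
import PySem

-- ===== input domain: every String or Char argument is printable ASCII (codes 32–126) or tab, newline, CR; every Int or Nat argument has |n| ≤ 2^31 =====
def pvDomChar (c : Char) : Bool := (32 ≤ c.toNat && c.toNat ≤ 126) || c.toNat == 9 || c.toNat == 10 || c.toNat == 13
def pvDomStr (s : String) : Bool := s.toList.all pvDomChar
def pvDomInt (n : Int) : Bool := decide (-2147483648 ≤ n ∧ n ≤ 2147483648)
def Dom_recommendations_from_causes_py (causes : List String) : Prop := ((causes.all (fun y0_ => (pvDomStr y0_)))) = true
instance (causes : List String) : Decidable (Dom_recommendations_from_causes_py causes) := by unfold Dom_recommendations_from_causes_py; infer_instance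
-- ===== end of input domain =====

-- B: single pass with six hit flags (each cause lowered once) instead of six any() scans; alternative decomposition, same result.


-- ===== PORT A =====
def recommendations_from_causes_py (causes : List String) : List String :=
  let recs : List String := []
  let recs := if causes.any (fun c => PySem.Str.isIn "silence" (PySem.Str.lower c) || PySem.Str.isIn "cadence" (PySem.Str.lower c)) then
      recs ++ ["Schedule a status checkpoint within 48 hours"] ++ ["Request a written progress update with blockers"]
    else recs
  let recs := if causes.any (fun c => PySem.Str.isIn "completion" (PySem.Str.lower c) || PySem.Str.isIn "milestone" (PySem.Str.lower c)) then
      recs ++ ["Re-baseline milestones and confirm next 2 deliverables"] ++ ["Add weekly milestone acceptance review"]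
    else recs
  let recs := if causes.any (fun c => PySem.Str.isIn "payment" (PySem.Str.lower c)) then
      recs ++ ["Escalate payment clearance and confirm disbursement date"]
    else recs
  let recs := if causes.any (fun c => PySem.Str.isIn "dependency" (PySem.Str.lower c)) then
      recs ++ ["Create dependency owner list and set due dates"]
    else recs
  let recs := if causes.any (fun c => PySem.Str.isIn "procurement" (PySem.Str.lower c)) then
      recs ++ ["Review procurement timeline and vendor readiness"]
    else recs
  let recs := if causes.any (fun c => PySem.Str.isIn "uat" (PySem.Str.lower c)) then
      recs ++ ["Define UAT entry/exit criteria and assign test owners"]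
    else recs
  if recs ≠ [] then PySem.List.slice recs none (some 6) else ["Monitor and keep update cadence stable"]

-- ===== PORT B =====
-- B-side: one fold over causes maintaining six hit flags (each cause lowered once)
def pvStep (h : Bool × Bool × Bool × Bool × Bool × Bool) (c : String) :
    Bool × Bool × Bool × Bool × Bool × Bool :=
  let lc := PySem.Str.lower c
  (h.1 || PySem.Str.isIn "silence" lc || PySem.Str.isIn "cadence" lc,
   h.2.1 || PySem.Str.isIn "completion" lc || PySem.Str.isIn "milestone" lc,
   h.2.2.1 || PySem.Str.isIn "payment" lc,
   h.2.2.2.1 || PySem.Str.isIn "dependency" lc,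
   h.2.2.2.2.1 || PySem.Str.isIn "procurement" lc,
   h.2.2.2.2.2 || PySem.Str.isIn "uat" lc)

def recommendations_from_causes_py_alt (causes : List String) : List String :=
  let h := causes.foldl pvStep (false, false, false, false, false, false)
  let recs : List String :=
    (if h.1 then ["Schedule a status checkpoint within 48 hours",
                  "Request a written progress update with blockers"] else []) ++
    (if h.2.1 then ["Re-baseline milestones and confirm next 2 deliverables",
                    "Add weekly milestone acceptance review"] else []) ++
    (if h.2.2.1 then ["Escalate payment clearance and confirm disbursement date"] else []) ++
    (if h.2.2.2.1 then ["Create dependency owner list and set due dates"] else []) ++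
    (if h.2.2.2.2.1 then ["Review procurement timeline and vendor readiness"] else []) ++
    (if h.2.2.2.2.2 then ["Define UAT entry/exit criteria and assign test owners"] else [])
  if recs ≠ [] then PySem.List.slice recs none (some 6) else ["Monitor and keep update cadence stable"]

-- ===== PRECONDITION & SPEC =====
def Spec_recommendations_from_causes_py (causes : List String) (out : List String) : Prop := out = recommendations_from_causes_py_alt causes
instance (causes : List String) (out : List String) : Decidable (Spec_recommendations_from_causes_py causes out) := by unfold Spec_recommendations_from_causes_py; infer_instance

-- ===== CLAIM (what is proved, stated in full; the proofs are below) =====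
def Claim_equal_recommendations_from_causes_py : Prop := ∀ (causes : List String), Dom_recommendations_from_causes_py causes → Spec_recommendations_from_causes_py causes (recommendations_from_causes_py causes)

-- ===== LEMMAS AND PROOFS =====


-- the fold computes exactly the six any-scans
lemma pvFold_eq (causes : List String) (h : Bool × Bool × Bool × Bool × Bool × Bool) :
    causes.foldl pvStep h =
      (h.1 || causes.any (fun c => PySem.Str.isIn "silence" (PySem.Str.lower c) || PySem.Str.isIn "cadence" (PySem.Str.lower c)),
       h.2.1 || causes.any (fun c => PySem.Str.isIn "completion" (PySem.Str.lower c) || PySem.Str.isIn "milestone" (PySem.Str.lower c)),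
       h.2.2.1 || causes.any (fun c => PySem.Str.isIn "payment" (PySem.Str.lower c)),
       h.2.2.2.1 || causes.any (fun c => PySem.Str.isIn "dependency" (PySem.Str.lower c)),
       h.2.2.2.2.1 || causes.any (fun c => PySem.Str.isIn "procurement" (PySem.Str.lower c)),
       h.2.2.2.2.2 || causes.any (fun c => PySem.Str.isIn "uat" (PySem.Str.lower c))) := by
  induction causes generalizing h with
  | nil => simp
  | cons c cs ih =>
    simp only [List.foldl_cons, ih, List.any_cons, pvStep]
    obtain ⟨a, b, p, d, e, f⟩ := h
    simp [Bool.or_assoc]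

-- ===== VERDICT (by name: the statement is the Claim_ definition above) =====
set_option maxHeartbeats 1000000 in
theorem recommendations_from_causes_py_spec : Claim_equal_recommendations_from_causes_py := by
  intro causes _
  unfold Spec_recommendations_from_causes_py recommendations_from_causes_py recommendations_from_causes_py_alt
  rw [pvFold_eq]
  simp only [Bool.false_or]
  split_ifs <;> simp_all
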